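-- pv_equiv track=rewrite | github.com/chadgracia/outreach-agent | lambda_function.py | _append_url_before_signoff
-- ===== SOURCE A (Python) =====
-- def _append_url_before_signoff(body, url):
--     """Insert the URL on its own line before the sign-off line."""
--     lines = body.split("\n")
--     signoff_idx = None
--     for i in range(len(lines) - 1, -1, -1):
--         s = lines[i].strip().lower()
--         if s.startswith("sincerely") or s in {"chad", "chad,", "chad gracia"}:
--             signoff_idx = i
--             break
--     if signoff_idx is None:
--         return body.rstrip() + "\n\n" + url
--     return "\n".join(lines[:signoff_idx] + [url, ""] + lines[signoff_idx:])
-- ===== SOURCE B (Python) =====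
-- def _append_url_before_signoff(body, url):
--     """Insert the URL on its own line before the sign-off line."""
--     def is_signoff(line):
--         s = line.strip().lower()
--         return s.startswith("sincerely") or s in {"chad", "chad,", "chad gracia"}
--
--     def insert(rev):
--         # rev holds the remaining lines in reverse order; returns the rebuilt
--         # reversed list with [url, ""] spliced in, or None if no sign-off line.
--         if not rev:
--             return None
--         head, rest = rev[0], rev[1:]
--         if is_signoff(head):
--             return [head, "", url] + rest
--         tail = insert(rest)
--         if tail is None:
--             return None
--         return [head] + tail
--
--     res = insert(body.split("\n")[::-1])
--     if res is None:
--         return body.rstrip() + "\n\n" + url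
--     return "\n".join(reversed(res))
-- ===== Notes on version B (the rewrite author's own statement) =====
-- stated objective: alternative
-- what changed: Replaces A's backward index loop plus slice-based splicing by a structural recursion over the reversed line list that rebuilds the output back-to-front, splicing [url, ''] in at the first match it meets (no indices, no slices); the fallback is unchanged.
import Mathlib
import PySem

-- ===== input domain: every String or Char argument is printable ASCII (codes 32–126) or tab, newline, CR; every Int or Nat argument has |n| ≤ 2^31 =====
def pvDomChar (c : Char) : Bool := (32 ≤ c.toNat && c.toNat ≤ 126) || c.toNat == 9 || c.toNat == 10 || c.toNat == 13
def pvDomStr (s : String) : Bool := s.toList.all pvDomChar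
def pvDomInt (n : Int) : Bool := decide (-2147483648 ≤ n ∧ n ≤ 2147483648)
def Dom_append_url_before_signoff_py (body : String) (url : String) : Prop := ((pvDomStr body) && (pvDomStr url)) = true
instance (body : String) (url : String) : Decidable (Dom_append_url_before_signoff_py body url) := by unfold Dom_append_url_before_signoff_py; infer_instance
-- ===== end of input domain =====

-- B rebuilds the result by a structural recursion over the reversed line list,
-- splicing [url, ""] in at the first sign-off it meets, instead of A's backward
-- index loop plus slice-based splicing (objective: alternative).

-- ===== PORT A =====
-- shared sign-off predicate: s = line.strip().lower(); s.startswith("sincerely") or s in {...}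
def pvMatch (line : String) : Bool :=
  let s := PySem.Str.lower (PySem.Str.strip line)
  PySem.Str.startswith s "sincerely" || s == "chad" || s == "chad," || s == "chad gracia"

-- A's loop: for i in range(len(lines)-1, -1, -1): … break on first hit
def pvFindA (lines : List String) : List Int → Option Int
  | [] => none
  | i :: rest =>
    match PySem.List.pyGet? lines i with
    | some line => if pvMatch line then some i else pvFindA lines rest
    | none => none          -- unreachable: every index from the range is in bounds

def append_url_before_signoff_py (body : String) (url : String) : String :=
  let lines := (PySem.Str.split? body "\n").getD []  -- sep "\n" ≠ "", so split? is always some: exact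
  match pvFindA lines (PySem.List.pyRange ((lines.length : Int) - 1) (-1) (-1)) with
  | none => PySem.Str.rstrip body ++ "\n\n" ++ url
  | some i =>
      PySem.Str.join "\n"
        (PySem.List.slice lines none (some i) ++ [url, ""] ++ PySem.List.slice lines (some i) none)

-- ===== PORT B =====
-- B's insert(rev): recursion on the reversed line list; at the first match h
-- return [h, "", url] ++ rest, otherwise cons the head onto the recursive result
def pvIns (url : String) : List String → Option (List String)
  | [] => none
  | h :: t =>
      if pvMatch h then some (h :: "" :: url :: t)
      else (pvIns url t).map (fun tail => h :: tail)

def append_url_before_signoff_py_alt (body : String) (url : String) : String :=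
  let lines := (PySem.Str.split? body "\n").getD []  -- sep "\n" ≠ "", so split? is always some: exact
  match pvIns url ((PySem.List.slice? lines none none (-1)).getD []) with  -- body.split("\n")[::-1]
  | none => PySem.Str.rstrip body ++ "\n\n" ++ url
  | some r => PySem.Str.join "\n" r.reverse       -- "\n".join(reversed(res))

-- ===== PRECONDITION & SPEC =====
def Spec_append_url_before_signoff_py (body : String) (url : String) (out : String) : Prop := out = append_url_before_signoff_py_alt body url
instance (body : String) (url : String) (out : String) : Decidable (Spec_append_url_before_signoff_py body url out) := by unfold Spec_append_url_before_signoff_py; infer_instance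

-- ===== CLAIM (what is proved, stated in full; the proofs are below) =====
def Claim_equal_append_url_before_signoff_py : Prop := ∀ (body : String) (url : String), Dom_append_url_before_signoff_py body url → Spec_append_url_before_signoff_py body url (append_url_before_signoff_py body url)

-- ===== LEMMAS AND PROOFS =====

-- first match in a list of (index, line) pairs
def pvF : List (Int × String) → Option Int
  | [] => none
  | (i, l) :: r => if pvMatch l then some i else pvF r

theorem pvFindA_eq_pvF (lines : List String) (js : List Int)
    (h : ∀ j ∈ js, PySem.List.pyGet? lines j = some (PySem.List.pyGetD lines j "")) :
    pvFindA lines js = pvF (js.map (fun j => (j, PySem.List.pyGetD lines j ""))) := by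
  induction js with
  | nil => simp [pvFindA, pvF]
  | cons j r ih =>
    have hj := h j (by simp)
    simp only [pvFindA, pvF, List.map_cons, hj]
    rw [ih (fun x hx => h x (by simp [hx]))]

theorem pv_range_rev (n : ℕ) :
    (List.range n).map (fun (k : ℕ) => ((n : Int) - 1) - (k : Int)) =
      ((List.range n).map (fun (k : ℕ) => (k : Int))).reverse := by
  induction n with
  | zero => simp
  | succ n ih =>
    have hf : ((fun (k : ℕ) => (((n + 1 : ℕ) : Int) - 1) - (k : Int)) ∘ Nat.succ)
        = fun (k : ℕ) => (((n : ℕ) : Int) - 1) - (k : Int) := by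
      funext k; simp; ring
    rw [List.range_succ_eq_map, List.map_cons, List.map_map, hf, ih]
    conv_rhs => rw [← List.range_succ_eq_map, List.range_succ]
    rw [List.map_append, List.reverse_append]
    simp

theorem pv_idx_rev (n : ℕ) :
    PySem.List.pyRange ((n : Int) - 1) (-1) (-1) =
      (PySem.List.pyRange 0 (n : Int) 1).reverse := by
  rw [PySem.List.pyRange_neg_one, PySem.List.pyRange_one]
  have h1 : (((n : Int) - 1) - (-1)).toNat = n := by omega
  have h2 : (((n : Int)) - 0).toNat = n := by omega
  rw [h1, h2]
  have h3 : (fun (k : ℕ) => (0 : Int) + (k : Int)) = fun (k : ℕ) => ((k : ℕ) : Int) := by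
    funext k; ring
  rw [h3, ← pv_range_rev n]

-- A's backward loop is the first match over the reversed enumeration
theorem pv_coreA (lines : List String) :
    pvFindA lines (PySem.List.pyRange ((lines.length : Int) - 1) (-1) (-1)) =
      pvF (PySem.List.enumerate lines).reverse := by
  rw [PySem.List.enumerate_eq_map_pyRange lines ""]
  have hlen : PySem.List.len lines = (lines.length : Int) := rfl
  rw [hlen, ← List.map_reverse, ← pv_idx_rev lines.length]
  apply pvFindA_eq_pvF
  intro j hj
  rw [pv_idx_rev, List.mem_reverse, PySem.List.mem_pyRange_one] at hj
  have h2 : j < (lines.length : Int) := hj.2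
  rw [PySem.List.pyGet?_eq_some_getElem lines hj.1 (by exact_mod_cast h2)]
  congr 1
  exact (PySem.List.pyGetD_eq_getElem lines "" hj.1 (by exact_mod_cast h2)).symm

-- B's recursion over the reversed list computes exactly A's find-and-splice
theorem pv_main (url : String) (rev : List String) :
    (pvIns url rev = none ∧ pvF (PySem.List.enumerate rev.reverse).reverse = none) ∨
    (∃ (r : List String) (n : ℕ), pvIns url rev = some r ∧ n < rev.length ∧
       pvF (PySem.List.enumerate rev.reverse).reverse = some ((n : ℕ) : Int) ∧
       r.reverse = rev.reverse.take n ++ [url, ""] ++ rev.reverse.drop n) := by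
  induction rev with
  | nil => left; simp [pvIns, PySem.List.enumerate_nil, pvF]
  | cons h t ih =>
    have henum : (PySem.List.enumerate (h :: t).reverse).reverse
        = ((0 + (t.reverse.length : Int), h)) :: (PySem.List.enumerate t.reverse).reverse := by
      rw [List.reverse_cons, PySem.List.enumerate_append]
      simp [PySem.List.enumerate_cons, PySem.List.enumerate_nil]
    by_cases hm : pvMatch h
    · right
      refine ⟨h :: "" :: url :: t, t.length, by simp [pvIns, hm], by simp, ?_, ?_⟩
      · rw [henum]; simp [pvF, hm]
      · have h1 : List.take t.length (h :: t).reverse = t.reverse := by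
          rw [List.reverse_cons]; exact List.take_left' (by simp)
        have h2 : List.drop t.length (h :: t).reverse = [h] := by
          rw [List.reverse_cons]; exact List.drop_left' (by simp)
        rw [h1, h2]; simp
    · rcases ih with ⟨hnone, hf⟩ | ⟨r, n, hsome, hn, hf, hr⟩
      · left
        constructor
        · simp [pvIns, hm, hnone]
        · rw [henum]; simp [pvF, hm, hf]
      · right
        refine ⟨h :: r, n, by simp [pvIns, hm, hsome], by simp; omega, ?_, ?_⟩
        · rw [henum]; simp [pvF, hm, hf]
        · have hle : n ≤ t.reverse.length := by simp; omega
          simp only [List.reverse_cons]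
          rw [List.take_append_of_le_length hle, List.drop_append_of_le_length hle, hr]
          simp

-- ===== VERDICT (by name: the statement is the Claim_ definition above) =====
theorem append_url_before_signoff_py_spec : Claim_equal_append_url_before_signoff_py := by
  intro body url _
  unfold Spec_append_url_before_signoff_py
  simp only [append_url_before_signoff_py, append_url_before_signoff_py_alt]
  generalize (PySem.Str.split? body "\n").getD [] = lines
  have hrev : (PySem.List.slice? lines none none (-1)).getD [] = lines.reverse := by
    rw [PySem.List.slice?_none_none_neg_one]; rfl
  rw [hrev, pv_coreA]
  rcases pv_main url lines.reverse with ⟨hnone, hf⟩ | ⟨r, n, hsome, hn, hf, hr⟩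
  · rw [List.reverse_reverse] at hf
    rw [hf, hnone]
  · rw [List.reverse_reverse] at hf hr
    rw [hf, hsome]
    simp only [hr, PySem.List.slice_to_natCast, PySem.List.slice_from_natCast]
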